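-- pv_equiv track=rewrite | github.com/NicolasSchreuder/KernelDNA | kernel.py | spectrum_kernel
-- ===== SOURCE A (Python) =====
-- from collections import Counter
--
-- def get_spectrum(string, k=3):
--     """
--     Returns k-spectrum for a given string
--     """
--     spectrum = [string[i:i+k] for i in range(len(string)-k+1)]
--     return spectrum
--
-- def spectrum_kernel(x, y, kernel_parameters):
--     """
--     k-spectrum kernel evaluation between string x and y
--     """
--     k = kernel_parameters['k']
--     K_xy = 0
--
--     # We store the spectrum as Counter dictionaries for efficient computing
--     phi_x = Counter(get_spectrum(x, k))
--     phi_y = Counter(get_spectrum(y, k))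
--
--     for key in phi_x.keys():
--         if key in phi_y.keys():
--             K_xy += phi_x[key]*phi_y[key]
--
--     return K_xy
-- ===== SOURCE B (Python) =====
-- def spectrum_kernel(x, y, kernel_parameters):
--     """
--     k-spectrum kernel by direct pairwise comparison: compare every k-window of x
--     with every k-window of y, counting matching pairs. No counting tables.
--     """
--     k = kernel_parameters['k']
--     K_xy = 0
--     for i in range(len(x) - k + 1):
--         xi = x[i:i+k]
--         for j in range(len(y) - k + 1):
--             if xi == y[j:j+k]:
--                 K_xy += 1
--     return K_xy
-- ===== Notes on version B (the rewrite author's own statement) =====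
-- stated objective: alternative
-- what changed: B drops the Counter tables entirely and counts matching window pairs directly with two nested position loops (each equal pair of k-windows contributes 1), instead of building two Counters and summing products over the intersection of their key sets; it trades hash tables for a quadratic pairwise scan.
import Mathlib
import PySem

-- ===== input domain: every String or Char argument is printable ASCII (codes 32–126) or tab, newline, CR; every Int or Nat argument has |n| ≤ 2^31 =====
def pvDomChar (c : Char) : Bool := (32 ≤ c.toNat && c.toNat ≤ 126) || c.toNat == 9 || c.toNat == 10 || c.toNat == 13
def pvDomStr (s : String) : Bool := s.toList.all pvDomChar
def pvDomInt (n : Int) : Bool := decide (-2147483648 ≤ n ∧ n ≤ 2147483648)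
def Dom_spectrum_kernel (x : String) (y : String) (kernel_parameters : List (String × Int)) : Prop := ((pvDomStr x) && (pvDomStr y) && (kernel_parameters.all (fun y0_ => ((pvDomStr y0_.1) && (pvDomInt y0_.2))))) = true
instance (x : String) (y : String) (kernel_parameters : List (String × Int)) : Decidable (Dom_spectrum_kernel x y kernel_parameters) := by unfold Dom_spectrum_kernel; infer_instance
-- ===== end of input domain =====

-- B counts matching window pairs with two nested position loops, no count tables; return value only, no mutation.

-- ===== PORT A =====
-- shared module helper: get_spectrum(string, k) = [string[i:i+k] for i in range(len(string)-k+1)]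
def get_spectrum (string : String) (k : Int) : List String :=
  (PySem.List.pyRange 0 (PySem.Str.len string - k + 1) 1).map
    (fun i => PySem.Str.slice string (some i) (some (i + k)))

def spectrum_kernel (x : String) (y : String) (kernel_parameters : List (String × Int)) : Int :=
  -- k = kernel_parameters['k']  (KeyError when absent: excluded by Pre_; 0 is a dummy there)
  let k : Int := (PySem.Dict.mk kernel_parameters).getD "k" 0
  let phi_x := PySem.Dict.counter (get_spectrum x k)
  let phi_y := PySem.Dict.counter (get_spectrum y k)
  phi_x.keys.foldl
    (fun acc key =>
      if phi_y.keys.contains key then acc + phi_x.getD key 0 * phi_y.getD key 0 else acc) 0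

-- ===== PORT B =====
def spectrum_kernel_alt (x : String) (y : String) (kernel_parameters : List (String × Int)) : Int :=
  let k : Int := (PySem.Dict.mk kernel_parameters).getD "k" 0
  (PySem.List.pyRange 0 (PySem.Str.len x - k + 1) 1).foldl
    (fun K_xy i =>
      let xi := PySem.Str.slice x (some i) (some (i + k))
      (PySem.List.pyRange 0 (PySem.Str.len y - k + 1) 1).foldl
        (fun acc j => if xi == PySem.Str.slice y (some j) (some (j + k)) then acc + 1 else acc)
        K_xy)
    0

-- ===== PRECONDITION & SPEC =====
-- Pre_ excludes exactly the inputs where Python A raises KeyError: no "k" key in kernel_parameters.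
def Pre_spectrum_kernel (x : String) (y : String) (kernel_parameters : List (String × Int)) : Prop :=
  ((PySem.Dict.mk kernel_parameters).get? "k").isSome = true
instance (x : String) (y : String) (kernel_parameters : List (String × Int)) : Decidable (Pre_spectrum_kernel x y kernel_parameters) := by unfold Pre_spectrum_kernel; infer_instance

def pvWitness_spectrum_kernel : String × String × (List (String × Int)) := ("abcab", "bcabc", [("k", 2)])

def Spec_spectrum_kernel (x : String) (y : String) (kernel_parameters : List (String × Int)) (out : Int) : Prop := out = spectrum_kernel_alt x y kernel_parameters
instance (x : String) (y : String) (kernel_parameters : List (String × Int)) (out : Int) : Decidable (Spec_spectrum_kernel x y kernel_parameters out) := by unfold Spec_spectrum_kernel; infer_instance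

-- ===== CLAIM (what is proved, stated in full; the proofs are below) =====
def Claim_equal_spectrum_kernel : Prop := ∀ (x : String) (y : String) (kernel_parameters : List (String × Int)), Dom_spectrum_kernel x y kernel_parameters → Pre_spectrum_kernel x y kernel_parameters → Spec_spectrum_kernel x y kernel_parameters (spectrum_kernel x y kernel_parameters)

-- ===== LEMMAS AND PROOFS =====

-- Σ_{key ∈ S} (if key = a then f key else 0) = f a when S has no duplicates and a ∈ S
theorem pv_sum_indicator {α : Type} [DecidableEq α] (S : List α) (a : α) (f : α → Int) :
    a ∈ S → S.Nodup → (S.map (fun key => if key = a then f key else 0)).sum = f a := by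
  induction S with
  | nil => intro ha _; cases ha
  | cons b t ih =>
    intro ha hnd
    simp only [List.map_cons, List.sum_cons]
    rcases List.mem_cons.mp ha with h | h
    · subst h
      have hz : ∀ key ∈ t, (if key = a then f key else 0) = 0 := by
        intro key hk
        have : key ≠ a := fun hkb => (List.nodup_cons.mp hnd).1 (hkb ▸ hk)
        simp [this]
      rw [List.map_congr_left hz]
      simp
    · have hba : b ≠ a := fun hba => (List.nodup_cons.mp hnd).1 (hba ▸ h)
      rw [ih h (List.nodup_cons.mp hnd).2]
      simp [hba]

-- grouping: summing count(key)·f(key) over any nodup superset S of l's elements is Σ_{s∈l} f s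
theorem pv_sum_count_mul {α : Type} [DecidableEq α] (l S : List α) (hnd : S.Nodup)
    (hsub : ∀ s ∈ l, s ∈ S) (f : α → Int) :
    (S.map (fun key => (l.count key : Int) * f key)).sum = (l.map f).sum := by
  induction l with
  | nil => simp
  | cons a t ih =>
    have hstep : ∀ key ∈ S, ((a :: t).count key : Int) * f key
        = (t.count key : Int) * f key + (if key = a then f key else 0) := by
      intro key _
      by_cases h : key = a
      · subst h; simp; ring
      · have h' : a ≠ key := fun e => h e.symm
        simp [h']
        exact fun e => absurd e h
    rw [List.map_congr_left hstep, List.sum_map_add]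
    rw [ih (fun s hs => hsub s (List.mem_cons_of_mem a hs)),
        pv_sum_indicator S a f (hsub a (List.mem_cons_self)) hnd]
    simp [add_comm]

-- A's keys-intersection fold equals Σ over x's raw k-mer list of its count in y's list
theorem pv_A_eq (lx ly : List String) :
    (PySem.Dict.counter lx).keys.foldl
      (fun acc key =>
        if (PySem.Dict.counter ly).keys.contains key then
          acc + (PySem.Dict.counter lx).getD key 0 * (PySem.Dict.counter ly).getD key 0
        else acc) 0
    = (lx.map (fun s => (ly.count s : Int))).sum := by
  have hA : (PySem.Dict.counter lx).keys.foldl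
      (fun acc key =>
        if (PySem.Dict.counter ly).keys.contains key then
          acc + (PySem.Dict.counter lx).getD key 0 * (PySem.Dict.counter ly).getD key 0
        else acc) 0
      = ((PySem.Set.ofList lx).map (fun key => (lx.count key : Int) * (ly.count key : Int))).sum := by
    rw [PySem.Dict.keys_counter lx, PySem.Dict.keys_counter ly]
    rw [PySem.List.foldl_congr_mem (PySem.Set.ofList lx) _
        (fun acc key => acc + (lx.count key : Int) * (ly.count key : Int)) 0 ?_,
      PySem.List.foldl_add]
    · simp
    · intro acc key hk
      by_cases h : key ∈ ly
      · simp [PySem.Dict.getD_counter]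
        exact fun hn => absurd h hn
      · have hz : ly.count key = 0 := List.count_eq_zero.mpr h
        simp [h, hz]
  rw [hA]
  exact pv_sum_count_mul lx (PySem.Set.ofList lx)
      (by simp [← PySem.List.dedup_eq_ofList]; exact PySem.List.nodup_dedup lx)
      (fun s hs => (PySem.Set.mem_ofList lx s).mpr hs)
      (fun key => (ly.count key : Int))

-- inner counting loop: 'for j: if p j: acc += 1' is acc + countP p
theorem pv_inner_count {α : Type} (l : List α) (p : α → Bool) (acc : Int) :
    l.foldl (fun a j => if p j then a + 1 else a) acc = acc + (l.countP p : Int) := by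
  induction l generalizing acc with
  | nil => simp
  | cons b t ih =>
    by_cases h : p b
    · simp [List.foldl_cons, h, ih]
      ring
    · simp [List.foldl_cons, h, ih]

-- B's nested position loops equal Σ over x-positions of the count of equal y-windows
theorem pv_B_eq (rx ry : List Int) (fx fy : Int → String) :
    rx.foldl (fun K_xy i =>
        ry.foldl (fun acc j => if fx i == fy j then acc + 1 else acc) K_xy) 0
    = (rx.map (fun i => ((ry.map fy).count (fx i) : Int))).sum := by
  have hstep : ∀ (K_xy : Int) (i : Int), i ∈ rx →
      ry.foldl (fun acc j => if fx i == fy j then acc + 1 else acc) K_xy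
      = K_xy + ((ry.map fy).count (fx i) : Int) := by
    intro K_xy i _
    rw [pv_inner_count]
    congr 1
    rw [List.count_eq_countP, List.countP_map]
    congr 1
    refine List.countP_congr ?_
    intro a _
    simp [Function.comp]
    exact eq_comm
  rw [PySem.List.foldl_congr_mem rx _
      (fun K_xy i => K_xy + ((ry.map fy).count (fx i) : Int)) 0
      (fun acc i hi => hstep acc i hi),
    PySem.List.foldl_add]
  simp

-- ===== VERDICT (by name: the statement is the Claim_ definition above) =====
theorem spectrum_kernel_spec : Claim_equal_spectrum_kernel := by
  intro x y kernel_parameters _ _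
  unfold Spec_spectrum_kernel spectrum_kernel spectrum_kernel_alt
  set k : Int := (PySem.Dict.mk kernel_parameters).getD "k" 0 with hk
  rw [pv_A_eq (get_spectrum x k) (get_spectrum y k), pv_B_eq]
  simp only [get_spectrum, List.map_map]
  rfl
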